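-- pv_equiv track=rewrite | github.com/rlaalswn222/Saltlux-AI-Training-2024-2025 | test_01/python_test01/ass08.py | to_
-- ===== SOURCE A (Python) =====
-- def to_(num): #num type=int
--     decimal = 0
--     length = len(str(num))
--     num_list = str(num)
--     for round in range(length):
--         bin = int(num_list[round]) * (2**(length-round-1))
--         decimal += bin
--
--     num_dec = decimal
--     five_num =''
--     # 0이 될 때까지 while
--     while num_dec > 0:
--         remain = num_dec % 5  # 나머지를 구함
--         five_num = str(remain) + five_num  # 나머지를 이진법 문자열에 앞으로 추가
--         num_dec = num_dec//5 # num에 몫을 저장하여 반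
--     five_num = int(five_num) # type을 정수형으로 변환
--
--     return decimal, five_num
-- ===== SOURCE B (Python) =====
-- def to_(num):
--     # Phase 1: read the decimal digits of num arithmetically (least significant
--     # first) and reinterpret them as binary with a doubling place-value accumulator.
--     decimal = 0
--     p = 1
--     n = num
--     while n > 0:
--         n, d = divmod(n, 10)
--         decimal += d * p
--         p *= 2
--     # Phase 2: collect the base-5 digits by appending, then join reversed and
--     # re-parse with int() (so num <= 0 still raises ValueError, as in A).
--     digits = []
--     n = decimal
--     while n > 0:
--         n, r = divmod(n, 5)
--         digits.append(str(r))
--     five_num = int(''.join(reversed(digits)))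
--     return decimal, five_num
-- ===== Notes on version B (the rewrite author's own statement) =====
-- stated objective: alternative
-- what changed: B extracts the decimal digits of num arithmetically with divmod and a doubling accumulator instead of indexing str(num) and computing an explicit power for each position, and builds the base-5 digit string by appending remainders to a list joined reversed instead of repeated string prepending; the final int() re-parse is kept.
-- outside the precondition, e.g. on to_(0): A raises ValueError, B raises ValueError; on to_(-3): A raises ValueError, B raises ValueError
import Mathlib
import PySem

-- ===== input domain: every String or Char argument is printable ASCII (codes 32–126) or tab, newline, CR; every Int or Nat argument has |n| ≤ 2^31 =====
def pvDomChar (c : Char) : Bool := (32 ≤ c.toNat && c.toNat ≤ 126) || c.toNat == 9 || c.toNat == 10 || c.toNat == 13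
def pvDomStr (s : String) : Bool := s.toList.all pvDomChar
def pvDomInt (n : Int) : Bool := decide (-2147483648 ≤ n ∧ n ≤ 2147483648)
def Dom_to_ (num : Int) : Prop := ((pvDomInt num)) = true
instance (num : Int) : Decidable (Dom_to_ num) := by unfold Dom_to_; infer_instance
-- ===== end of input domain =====

-- B extracts the decimal digits of num arithmetically with divmod and a doubling
-- accumulator instead of indexing str(num) and computing an explicit power per digit,
-- and builds the base-5 digits by appending then joining reversed instead of
-- repeated string prepending (objective: alternative).

-- ===== PORT A =====
-- int(num_list[round]) for a single character
def pvDigit (c : Char) : Int := (PySem.Int.ofChars? [c]).getD 0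

-- the while loop: prepend str(num_dec % 5) until num_dec = 0
def pvFiveA (n : Int) (acc : List Char) : List Char :=
  if 0 < n then
    pvFiveA (PySem.Int.floordiv n 5) (PySem.Int.toChars (PySem.Int.mod n 5) ++ acc)
  else acc
termination_by n.toNat
decreasing_by
  rename_i h
  have h5 : PySem.Int.floordiv n 5 = n / 5 := PySem.Int.floordiv_eq_ediv_of_pos (by omega)
  rw [h5]; omega

def to_ (num : Int) : Int × Int :=
  let numList := PySem.Int.toChars num
  let length : Int := numList.length
  let decimal := (PySem.List.pyRange 0 length 1).foldl
    (fun d round =>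
      d + pvDigit (PySem.List.pyGetD numList round ' ') * 2 ^ (length - round - 1).toNat) 0
  let fiveNum := (PySem.Int.ofChars? (pvFiveA decimal [])).getD 0
  (decimal, fiveNum)

-- ===== PORT B =====
-- first while loop: n, d = divmod(n, 10); decimal += d * p; p *= 2
def pvBinLoop (n decimal p : Int) : Int :=
  if 0 < n then
    pvBinLoop ((PySem.Int.divmod? n 10).getD (0, 0)).1
      (decimal + ((PySem.Int.divmod? n 10).getD (0, 0)).2 * p) (p * 2)
  else decimal
termination_by n.toNat
decreasing_by
  rename_i h
  have hd : PySem.Int.divmod? n 10 = some (PySem.Int.floordiv n 10, PySem.Int.mod n 10) := rfl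
  rw [hd]
  have h10 : PySem.Int.floordiv n 10 = n / 10 := PySem.Int.floordiv_eq_ediv_of_pos (by omega)
  simp only [Option.getD_some]
  rw [h10]; omega

-- second while loop: n, r = divmod(n, 5); digits.append(str(r))
def pvFiveDigits (n : Int) (digits : List (List Char)) : List (List Char) :=
  if 0 < n then
    pvFiveDigits ((PySem.Int.divmod? n 5).getD (0, 0)).1
      (digits ++ [PySem.Int.toChars ((PySem.Int.divmod? n 5).getD (0, 0)).2])
  else digits
termination_by n.toNat
decreasing_by
  rename_i h
  have hd : PySem.Int.divmod? n 5 = some (PySem.Int.floordiv n 5, PySem.Int.mod n 5) := rfl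
  rw [hd]
  have h5 : PySem.Int.floordiv n 5 = n / 5 := PySem.Int.floordiv_eq_ediv_of_pos (by omega)
  simp only [Option.getD_some]
  rw [h5]; omega

def to__alt (num : Int) : Int × Int :=
  let decimal := pvBinLoop num 0 1
  let fiveNum :=
    (PySem.Int.ofChars? (PySem.Chars.join [] (pvFiveDigits decimal []).reverse)).getD 0
  (decimal, fiveNum)

-- ===== PRECONDITION & SPEC =====
-- Pre_ excludes num ≤ 0, where Python's int('') (num = 0) or int('-') (num < 0) raises ValueError.
def Pre_to_ (num : Int) : Prop := 0 < num
instance (num : Int) : Decidable (Pre_to_ num) := by unfold Pre_to_; infer_instance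
def pvWitness_to_ : Int := 23

def Spec_to_ (num : Int) (out : Int × Int) : Prop := out = to__alt num
instance (num : Int) (out : Int × Int) : Decidable (Spec_to_ num out) := by unfold Spec_to_; infer_instance

-- ===== CLAIM (what is proved, stated in full; the proofs are below) =====
def Claim_equal_to_ : Prop := ∀ (num : Int), Dom_to_ num → Pre_to_ num → Spec_to_ num (to_ num)

-- ===== LEMMAS AND PROOFS =====

-- divmod? by a nonzero literal, as its floordiv/mod pair
lemma pvDm10 (n : Int) :
    ((PySem.Int.divmod? n 10).getD (0, 0)) = (PySem.Int.floordiv n 10, PySem.Int.mod n 10) := rfl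
lemma pvDm5 (n : Int) :
    ((PySem.Int.divmod? n 5).getD (0, 0)) = (PySem.Int.floordiv n 5, PySem.Int.mod n 5) := rfl

-- Phase 1, A-side: the indexed power-sum equals Horner's accumulation, for any character list.
lemma pvSum_eq_horner (cs : List Char) :
    (List.range cs.length).foldl
      (fun d r => d + pvDigit (cs.getD r ' ') * 2 ^ (cs.length - r - 1)) 0 =
    cs.foldl (fun d c => d * 2 + pvDigit c) 0 := by
  induction cs using List.reverseRecOn with
  | nil => simp
  | append_singleton ds c ih =>
    have hlen : (ds ++ [c]).length = ds.length + 1 := by simp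
    rw [hlen, List.range_succ, List.foldl_append, List.foldl_append]
    simp only [List.foldl_cons, List.foldl_nil]
    have hbody : (List.range ds.length).foldl
        (fun d r => d + pvDigit ((ds ++ [c]).getD r ' ') * 2 ^ (ds.length + 1 - r - 1)) 0 =
        (List.range ds.length).foldl
        (fun d r => d + (pvDigit (ds.getD r ' ') * 2 ^ (ds.length - r - 1)) * 2) 0 := by
      apply PySem.List.foldl_congr_mem
      intro acc r hr
      have hr' : r < ds.length := List.mem_range.mp hr
      have h1 : (ds ++ [c]).getD r ' ' = ds.getD r ' ' := by
        simp [List.getD, List.getElem?_append_left hr']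
      have h2 : ds.length + 1 - r - 1 = (ds.length - r - 1) + 1 := by omega
      rw [h1, h2, pow_succ]; ring
    rw [hbody, PySem.List.foldl_add]
    have hsum : ((List.range ds.length).map
        (fun r => pvDigit (ds.getD r ' ') * 2 ^ (ds.length - r - 1) * 2)).sum =
        ((List.range ds.length).map
        (fun r => pvDigit (ds.getD r ' ') * 2 ^ (ds.length - r - 1))).sum * 2 := by
      rw [← List.sum_map_mul_right]
    have hih : ((List.range ds.length).map
        (fun r => pvDigit (ds.getD r ' ') * 2 ^ (ds.length - r - 1))).sum =
        ds.foldl (fun d c => d * 2 + pvDigit c) 0 := by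
      rw [← ih, PySem.List.foldl_add]; ring
    have hgd : (ds ++ [c]).getD ds.length ' ' = c := by
      simp [List.getD]
    rw [hsum, hih, hgd]
    simp

-- A's decimal phase equals Horner's rule over the digit characters
lemma pvDecimal_eq (num : Int) :
    (PySem.List.pyRange 0 ((PySem.Int.toChars num).length : Int) 1).foldl
      (fun d round =>
        d + pvDigit (PySem.List.pyGetD (PySem.Int.toChars num) round ' ') *
          2 ^ ((((PySem.Int.toChars num).length : Int)) - round - 1).toNat) 0 =
    (PySem.Int.toChars num).foldl (fun d c => d * 2 + pvDigit c) 0 := by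
  set cs := PySem.Int.toChars num with hcs
  rw [PySem.List.pyRange_zero_nat]
  rw [List.foldl_map]
  rw [← pvSum_eq_horner cs]
  apply PySem.List.foldl_congr_mem
  intro acc r hr
  have hr' : r < cs.length := List.mem_range.mp hr
  have h1 : PySem.List.pyGetD cs (r : Int) ' ' = cs.getD r ' ' := by
    simp
  have h2 : ((cs.length : Int) - (r : Int) - 1).toNat = cs.length - r - 1 := by omega
  rw [h1, h2]

-- Phase 1, B-side: accumulator law for pvBinLoop
lemma pvBinLoop_acc (n d p : Int) : pvBinLoop n d p = d + p * pvBinLoop n 0 1 := by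
  by_cases h : 0 < n
  · rw [pvBinLoop, if_pos h]
    conv_rhs => rw [pvBinLoop, if_pos h]
    simp only [pvDm10]
    have h10 : PySem.Int.floordiv n 10 = n / 10 := PySem.Int.floordiv_eq_ediv_of_pos (by omega)
    have hlt : (PySem.Int.floordiv n 10).toNat < n.toNat := by rw [h10]; omega
    rw [pvBinLoop_acc (PySem.Int.floordiv n 10) (d + PySem.Int.mod n 10 * p) (p * 2),
        pvBinLoop_acc (PySem.Int.floordiv n 10) (0 + PySem.Int.mod n 10 * 1) (1 * 2)]
    ring
  · rw [pvBinLoop, if_neg h]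
    conv_rhs => rw [pvBinLoop, if_neg h]
    ring
termination_by n.toNat
decreasing_by
  all_goals
    rw [PySem.Int.floordiv_eq_ediv_of_pos (by omega : (0:Int) < 10)]; omega

lemma pvBinLoop_nonpos (n : Int) (h : ¬ 0 < n) : pvBinLoop n 0 1 = 0 := by
  rw [pvBinLoop, if_neg h]

lemma pvBinLoop_pos (n : Int) (h : 0 < n) :
    pvBinLoop n 0 1 = PySem.Int.mod n 10 + 2 * pvBinLoop (PySem.Int.floordiv n 10) 0 1 := by
  rw [pvBinLoop, if_pos h]
  simp only [pvDm10]
  rw [pvBinLoop_acc]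
  ring

-- Nat.toDigitsCore: the accumulator is merely appended
lemma pvTdcAcc (b f : Nat) : ∀ (n : Nat) (acc : List Char),
    Nat.toDigitsCore b f n acc = Nat.toDigitsCore b f n [] ++ acc := by
  induction f with
  | zero => intro n acc; simp [Nat.toDigitsCore]
  | succ f ih =>
    intro n acc
    simp only [Nat.toDigitsCore]
    by_cases h : n / b = 0
    · simp [h]
    · simp only [h, if_false]
      rw [ih (n / b) (Nat.digitChar (n % b) :: acc), ih (n / b) [Nat.digitChar (n % b)]]
      simp
-- Nat.toDigitsCore: any sufficient fuel gives the same digits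
lemma pvTdcFuel (f : Nat) : ∀ (f' n : Nat), n < f → n < f' →
    Nat.toDigitsCore 10 f n [] = Nat.toDigitsCore 10 f' n [] := by
  induction f with
  | zero => intro f' n h _; omega
  | succ f ih =>
    intro f' n h h'
    cases f' with
    | zero => omega
    | succ f'' =>
      simp only [Nat.toDigitsCore]
      by_cases h0 : n / 10 = 0
      · simp [h0]
      · simp only [h0, if_false]
        have hn : 0 < n := by omega
        have hlt : n / 10 < n := Nat.div_lt_self hn (by norm_num)
        rw [pvTdcAcc 10 f (n / 10) [Nat.digitChar (n % 10)],
            pvTdcAcc 10 f'' (n / 10) [Nat.digitChar (n % 10)],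
            ih f'' (n / 10) (by omega) (by omega)]

lemma pvToDigits_lt10 (m : Nat) (h : m < 10) : Nat.toDigits 10 m = [Nat.digitChar m] := by
  simp [Nat.toDigits, Nat.toDigitsCore, Nat.div_eq_of_lt h, Nat.mod_eq_of_lt h]

lemma pvToDigits_step (m : Nat) (h : 10 ≤ m) :
    Nat.toDigits 10 m = Nat.toDigits 10 (m / 10) ++ [Nat.digitChar (m % 10)] := by
  have h0 : ¬ m / 10 = 0 := by omega
  have hlt : m / 10 < m := Nat.div_lt_self (by omega) (by norm_num)
  rw [Nat.toDigits]
  simp only [Nat.toDigitsCore, h0, if_false]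
  rw [pvTdcAcc 10 m (m / 10) [Nat.digitChar (m % 10)],
      pvTdcFuel m (m / 10 + 1) (m / 10) (by omega) (by omega)]
  rfl

-- pvDigit reads back the digit character
lemma pvDigit_digitChar (r : Nat) (h : r < 10) : pvDigit (Nat.digitChar r) = (r : Int) := by
  interval_cases r <;> decide

-- Horner over the decimal digit characters of m IS B's divmod loop
lemma pvHorner_toDigits (m : Nat) :
    (Nat.toDigits 10 m).foldl (fun d c => d * 2 + pvDigit c) 0 = pvBinLoop (m : Int) 0 1 := by
  by_cases h : m < 10
  · rw [pvToDigits_lt10 m h]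
    simp only [List.foldl_cons, List.foldl_nil, zero_mul, zero_add]
    rw [pvDigit_digitChar m h]
    by_cases h0 : m = 0
    · subst h0; simp [pvBinLoop_nonpos 0 (by omega)]
    · rw [pvBinLoop_pos (m : Int) (by omega)]
      have hf : PySem.Int.floordiv (m : Int) 10 = 0 := by
        rw [PySem.Int.floordiv_eq_ediv_of_pos (by omega)]; omega
      have hm : PySem.Int.mod (m : Int) 10 = (m : Int) := by
        rw [PySem.Int.mod_eq_emod_of_pos (by omega)]; omega
      rw [hf, hm, pvBinLoop_nonpos 0 (by omega)]
      ring
  · have hlt : m / 10 < m := Nat.div_lt_self (by omega) (by norm_num)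
    rw [pvToDigits_step m (by omega), List.foldl_append]
    simp only [List.foldl_cons, List.foldl_nil]
    rw [pvHorner_toDigits (m / 10), pvDigit_digitChar (m % 10) (by omega)]
    rw [pvBinLoop_pos (m : Int) (by omega)]
    have hf : PySem.Int.floordiv (m : Int) 10 = ((m / 10 : Nat) : Int) := by
      rw [PySem.Int.floordiv_eq_ediv_of_pos (by omega)]; omega
    have hm : PySem.Int.mod (m : Int) 10 = ((m % 10 : Nat) : Int) := by
      rw [PySem.Int.mod_eq_emod_of_pos (by omega)]; omega
    rw [hf, hm]
    ring
termination_by m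

lemma pvToChars_of_pos (num : Int) (h : 0 < num) :
    PySem.Int.toChars num = Nat.toDigits 10 num.toNat := by
  rw [PySem.Int.toChars, if_neg (by omega)]

-- ''.join is flatten
lemma pvJoin_nil_eq_flatten (xs : List (List Char)) :
    PySem.Chars.join [] xs = xs.flatten := by
  induction xs with
  | nil => simp [PySem.Chars.join, List.intercalate]
  | cons a t ih =>
    cases t with
    | nil => simp [PySem.Chars.join, List.intercalate]
    | cons b t' =>
      rw [PySem.Chars.join_cons_cons, ih]
      simp

-- accumulator laws for the two base-5 loops
lemma pvFiveA_acc (n : Int) (acc : List Char) :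
    pvFiveA n acc = pvFiveA n [] ++ acc := by
  by_cases h : 0 < n
  · rw [pvFiveA]
    conv_rhs => rw [pvFiveA]
    rw [if_pos h, if_pos h]
    have h5 : PySem.Int.floordiv n 5 = n / 5 := PySem.Int.floordiv_eq_ediv_of_pos (by omega)
    have hlt : (PySem.Int.floordiv n 5).toNat < n.toNat := by rw [h5]; omega
    rw [pvFiveA_acc (PySem.Int.floordiv n 5) (PySem.Int.toChars (PySem.Int.mod n 5) ++ acc),
        pvFiveA_acc (PySem.Int.floordiv n 5) (PySem.Int.toChars (PySem.Int.mod n 5) ++ [])]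
    simp
  · rw [pvFiveA]
    conv_rhs => rw [pvFiveA]
    rw [if_neg h, if_neg h]; simp
termination_by n.toNat
decreasing_by
  all_goals
    rw [PySem.Int.floordiv_eq_ediv_of_pos (by omega : (0:Int) < 5)]; omega

lemma pvFiveDigits_acc (n : Int) (digits : List (List Char)) :
    pvFiveDigits n digits = digits ++ pvFiveDigits n [] := by
  by_cases h : 0 < n
  · rw [pvFiveDigits]
    conv_rhs => rw [pvFiveDigits]
    rw [if_pos h, if_pos h]
    simp only [pvDm5]
    have h5 : PySem.Int.floordiv n 5 = n / 5 := PySem.Int.floordiv_eq_ediv_of_pos (by omega)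
    have hlt : (PySem.Int.floordiv n 5).toNat < n.toNat := by rw [h5]; omega
    rw [pvFiveDigits_acc (PySem.Int.floordiv n 5)
          (digits ++ [PySem.Int.toChars (PySem.Int.mod n 5)]),
        pvFiveDigits_acc (PySem.Int.floordiv n 5)
          ([] ++ [PySem.Int.toChars (PySem.Int.mod n 5)])]
    simp
  · rw [pvFiveDigits]
    conv_rhs => rw [pvFiveDigits]
    rw [if_neg h, if_neg h]; simp
termination_by n.toNat
decreasing_by
  all_goals
    rw [PySem.Int.floordiv_eq_ediv_of_pos (by omega : (0:Int) < 5)]; omega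

-- Phase 2: A's prepend-built string equals B's reversed-join of appended remainders.
lemma pvFive_eq (n : Int) :
    pvFiveA n [] = PySem.Chars.join [] (pvFiveDigits n []).reverse := by
  by_cases h : 0 < n
  · rw [pvFiveA, if_pos h, pvFiveDigits, if_pos h]
    simp only [pvDm5]
    have h5 : PySem.Int.floordiv n 5 = n / 5 := PySem.Int.floordiv_eq_ediv_of_pos (by omega)
    have hlt : (PySem.Int.floordiv n 5).toNat < n.toNat := by rw [h5]; omega
    rw [pvFiveA_acc, pvFiveDigits_acc, pvFive_eq (PySem.Int.floordiv n 5)]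
    simp [pvJoin_nil_eq_flatten]
  · rw [pvFiveA, if_neg h, pvFiveDigits, if_neg h]
    simp
termination_by n.toNat
decreasing_by
  all_goals
    rw [PySem.Int.floordiv_eq_ediv_of_pos (by omega : (0:Int) < 5)]; omega

-- ===== VERDICT (by name: the statement is the Claim_ definition above) =====
theorem to__spec : Claim_equal_to_ := by
  intro num _ hpre
  unfold Spec_to_ to_ to__alt
  simp only
  have hdec : (PySem.Int.toChars num).foldl (fun d c => d * 2 + pvDigit c) 0 =
      pvBinLoop num 0 1 := by
    rw [pvToChars_of_pos num hpre, pvHorner_toDigits num.toNat,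
        Int.toNat_of_nonneg (le_of_lt hpre)]
  rw [pvDecimal_eq num, hdec, pvFive_eq]
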